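-- pv_equiv track=rewrite | github.com/cjb230/advent_of_code_2019 | day_24_a.py | biodiversity
-- ===== SOURCE A (Python) =====
-- def biodiversity(input_grid):
--     i = 0
--     score = 0
--     for line in input_grid:
--         for cell in line:
--             if cell == '#':
--                 score += pow(2, i)
--             i += 1
--     return score
-- ===== SOURCE B (Python) =====
-- def biodiversity(input_grid):
--     bits = ''.join('1' if cell == '#' else '0' for line in input_grid for cell in line)
--     return int('0' + bits[::-1], 2)
-- ===== Notes on version B (the rewrite author's own statement) =====
-- stated objective: idiomatic
-- what changed: Replaces the incremental pow(2,i) accumulation with a single flattened bit string (LSB-first reversed) converted once via int(.,2).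
import Mathlib
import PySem

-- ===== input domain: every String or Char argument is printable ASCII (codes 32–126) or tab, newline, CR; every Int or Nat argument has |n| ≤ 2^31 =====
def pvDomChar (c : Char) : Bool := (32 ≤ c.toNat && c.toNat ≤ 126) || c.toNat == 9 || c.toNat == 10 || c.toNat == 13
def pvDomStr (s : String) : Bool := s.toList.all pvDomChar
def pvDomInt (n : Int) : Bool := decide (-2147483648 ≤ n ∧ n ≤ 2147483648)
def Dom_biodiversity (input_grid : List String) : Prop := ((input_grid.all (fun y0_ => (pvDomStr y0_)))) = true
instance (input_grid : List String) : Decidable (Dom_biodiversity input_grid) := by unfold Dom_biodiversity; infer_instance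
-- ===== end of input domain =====

-- B builds one flattened bit string and converts it once with int(.,2) instead of A's running pow(2,i) sum (objective: idiomatic).

-- ===== PORT A =====
-- state: (i, score), exactly A's two running variables
def biodiversity (input_grid : List String) : Int :=
  (input_grid.foldl
    (fun st line =>
      line.toList.foldl
        (fun (st : Nat × Int) cell =>
          (st.1 + 1, if cell = '#' then st.2 + 2 ^ st.1 else st.2))
        st)
    ((0 : Nat), (0 : Int))).2

-- ===== PORT B =====
-- the generator '1' if cell == '#' else '0'
def pvBit (cell : Char) : Char := if cell = '#' then '1' else '0'
-- int(s, 2): standard left-to-right base-2 accumulation over the digit chars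
def pvParse2 (cs : List Char) : Int :=
  cs.foldl (fun acc c => 2 * acc + (if c = '1' then 1 else 0)) 0
def biodiversity_alt (input_grid : List String) : Int :=
  pvParse2 ('0' :: ((input_grid.flatMap (fun line => line.toList)).map pvBit).reverse)

-- ===== PRECONDITION & SPEC =====
def Spec_biodiversity (input_grid : List String) (out : Int) : Prop := out = biodiversity_alt input_grid
instance (input_grid : List String) (out : Int) : Decidable (Spec_biodiversity input_grid out) := by unfold Spec_biodiversity; infer_instance

-- ===== CLAIM (what is proved, stated in full; the proofs are below) =====
def Claim_equal_biodiversity : Prop := ∀ (input_grid : List String), Dom_biodiversity input_grid → Spec_biodiversity input_grid (biodiversity input_grid)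

-- ===== LEMMAS AND PROOFS =====

-- the common value of a char list: LSB-first binary value of its '#' indicator bits
def pvVal (cs : List Char) : Int :=
  cs.foldr (fun c acc => 2 * acc + (if c = '#' then 1 else 0)) 0

-- B-side: folding over the reversed mapped bits from any accumulator
lemma pvParse2_aux (cs : List Char) (acc : Int) :
    (cs.map pvBit).reverse.foldl (fun acc c => 2 * acc + (if c = '1' then 1 else 0)) acc
      = acc * 2 ^ cs.length + pvVal cs := by
  induction cs generalizing acc with
  | nil => simp [pvVal]
  | cons c cs ih =>
      simp only [List.map_cons, List.reverse_cons, List.foldl_append, List.foldl_cons,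
        List.foldl_nil, ih, pvVal, List.foldr_cons, List.length_cons]
      simp only [pvBit]
      split_ifs <;> simp_all <;> ring

-- B-side: parsing the reversed bit string is the LSB-first value
lemma pvParse2_rev (cs : List Char) :
    pvParse2 ('0' :: (cs.map pvBit).reverse) = pvVal cs := by
  have h := pvParse2_aux cs 0
  simp only [pvParse2, List.foldl_cons]
  simpa using h

-- A-side: the inner char fold from state (i, score)
lemma pvA_chars (cs : List Char) (i : Nat) (score : Int) :
    (cs.foldl
      (fun (st : Nat × Int) cell =>
        (st.1 + 1, if cell = '#' then st.2 + 2 ^ st.1 else st.2))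
      (i, score)) = (i + cs.length, score + 2 ^ i * pvVal cs) := by
  induction cs generalizing i score with
  | nil => simp [pvVal]
  | cons c cs ih =>
      simp only [List.foldl_cons, ih, pvVal, List.foldr_cons, List.length_cons]
      simp only [Prod.mk.injEq]
      refine ⟨by omega, ?_⟩
      split_ifs with h <;> simp [pow_succ] <;> ring

-- A-side: the grid fold equals the fold over the flattened char list
lemma pvA_flat (ls : List String) (st : Nat × Int) :
    ls.foldl
      (fun st line =>
        line.toList.foldl
          (fun (st : Nat × Int) cell =>
            (st.1 + 1, if cell = '#' then st.2 + 2 ^ st.1 else st.2))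
          st)
      st
    = (ls.flatMap (fun line => line.toList)).foldl
        (fun (st : Nat × Int) cell =>
          (st.1 + 1, if cell = '#' then st.2 + 2 ^ st.1 else st.2))
        st := by
  induction ls generalizing st with
  | nil => rfl
  | cons l ls ih => simp [List.flatMap_cons, List.foldl_append, ih]

-- ===== VERDICT (by name: the statement is the Claim_ definition above) =====
theorem biodiversity_spec : Claim_equal_biodiversity := by
  intro g _
  show biodiversity g = biodiversity_alt g
  rw [biodiversity, biodiversity_alt, pvParse2_rev, pvA_flat, pvA_chars]
  simp
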